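-- pv_equiv track=rewrite | github.com/ElKamilaszczy/codewars | python/6kyu_katas/break_camelCase.py | solution
-- ===== SOURCE A (Python) =====
-- def solution(s: str):
--     resultWord=""
--     for letter in s:
--         if ord(letter) >= 65 and ord(letter) <= 90:
--             resultWord += f" {letter}"
--         else:
--             resultWord += letter
--     return resultWord
-- ===== SOURCE B (Python) =====
-- import re
--
-- def solution(s: str):
--     return re.sub(r'([A-Z])', r' \1', s)
-- ===== Notes on version B (the rewrite author's own statement) =====
-- stated objective: idiomatic
-- what changed: Replaced the explicit character loop with repeated string concatenation by a single regex substitution inserting a space before every A-Z letter.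
import Mathlib
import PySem

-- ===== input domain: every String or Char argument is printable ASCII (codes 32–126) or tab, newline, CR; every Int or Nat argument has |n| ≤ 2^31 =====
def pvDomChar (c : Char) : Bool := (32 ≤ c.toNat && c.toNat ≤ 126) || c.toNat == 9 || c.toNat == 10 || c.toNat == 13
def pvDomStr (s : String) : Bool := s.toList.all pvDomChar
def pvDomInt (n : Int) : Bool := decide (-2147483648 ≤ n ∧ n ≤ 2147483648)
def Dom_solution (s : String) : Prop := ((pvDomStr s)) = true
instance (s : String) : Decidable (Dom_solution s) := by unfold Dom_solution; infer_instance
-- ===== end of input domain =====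

-- B replaces A's accumulating character loop by one regex substitution (' ' before each A-Z); idiomatic rewrite, same result.

-- ===== PORT A =====
-- the loop: resultWord += " "+letter / letter; accumulator kept as List Char (Python str)
def solutionGo (acc : List Char) : List Char → List Char
  | [] => acc
  | c :: t =>
      solutionGo (acc ++ (if 65 ≤ c.toNat ∧ c.toNat ≤ 90 then [' ', c] else [c])) t

def solution (s : String) : String := String.mk (solutionGo [] s.toList)

-- ===== PORT B =====
-- re.sub(r'([A-Z])', r' \1', s): for this pattern the regex engine replaces each
-- A-Z character by " "+itself and leaves every other character; exact for this pattern.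
def solution_alt (s : String) : String :=
  String.mk (s.toList.flatMap fun c => if 'A' ≤ c ∧ c ≤ 'Z' then [' ', c] else [c])

-- ===== PRECONDITION & SPEC =====
def Spec_solution (s : String) (out : String) : Prop := out = solution_alt s
instance (s : String) (out : String) : Decidable (Spec_solution s out) := by unfold Spec_solution; infer_instance

-- ===== CLAIM (what is proved, stated in full; the proofs are below) =====
def Claim_equal_solution : Prop := ∀ (s : String), Dom_solution s → Spec_solution s (solution s)

-- ===== LEMMAS AND PROOFS =====

theorem solutionGo_eq (l : List Char) : ∀ acc : List Char,
    solutionGo acc l = acc ++ l.flatMap (fun c => if 'A' ≤ c ∧ c ≤ 'Z' then [' ', c] else [c]) := by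
  induction l with
  | nil => intro acc; simp [solutionGo]
  | cons c t ih =>
      intro acc
      have hc : (65 ≤ c.toNat ∧ c.toNat ≤ 90) ↔ ('A' ≤ c ∧ c ≤ 'Z') := by
        rw [Char.le_def, Char.le_def]
        simp only [Char.toNat, UInt32.le_iff_toNat_le]
        have h1 : ('A'.val.toNat) = 65 := rfl
        have h2 : ('Z'.val.toNat) = 90 := rfl
        omega
      simp [solutionGo, ih, List.flatMap_cons, hc]

-- ===== VERDICT (by name: the statement is the Claim_ definition above) =====
theorem solution_spec : Claim_equal_solution := by
  intro s _
  unfold Spec_solution solution solution_alt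
  rw [solutionGo_eq]
  simp
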